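-- pv_equiv track=rewrite | github.com/S-SIRIUS/Programmers | 프로그래머스/3/60059. 자물쇠와 열쇠/자물쇠와 열쇠.py | check
-- ===== SOURCE A (Python) =====
-- def check(key, lock, x_offset, y_offset):
--     len_lock = len(lock)
--     len_key = len(key)
--
--     for i in range(len_lock):
--         for j in range(len_lock):
--             key_x, key_y = i - x_offset, j - y_offset
--             if 0 <= key_x < len_key and 0 <= key_y < len_key:
--                 if lock[i][j] + key[key_x][key_y] != 1:
--                     return False
--             elif lock[i][j] != 1:
--                 return False
--     return True
-- ===== SOURCE B (Python) =====
-- def check(key, lock, x_offset, y_offset):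
--     len_lock = len(lock)
--     len_key = len(key)
--     # Pass 1: every lock cell NOT covered by the shifted key must already be 1.
--     for i in range(len_lock):
--         for j in range(len_lock):
--             if not (0 <= i - x_offset < len_key and 0 <= j - y_offset < len_key):
--                 if lock[i][j] != 1:
--                     return False
--     # Pass 2: iterate the key's own grid; cells landing inside the lock must sum to 1.
--     for kx in range(len_key):
--         for ky in range(len_key):
--             i, j = kx + x_offset, ky + y_offset
--             if 0 <= i < len_lock and 0 <= j < len_lock:
--                 if lock[i][j] + key[kx][ky] != 1:
--                     return False
--     return True
-- ===== Notes on version B (the rewrite author's own statement) =====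
-- stated objective: alternative
-- what changed: Splits A's single blended scan of the lock into two passes with differently-shaped index spaces: one over the lock grid checking only uncovered cells, and one over the key's own grid checking the overlap cells it maps into the lock.
-- outside the precondition, e.g. on check([[2, 1, -1]], [[1], [-2, 2]], 0, 0): A returns False, B raises IndexError
import Mathlib
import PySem

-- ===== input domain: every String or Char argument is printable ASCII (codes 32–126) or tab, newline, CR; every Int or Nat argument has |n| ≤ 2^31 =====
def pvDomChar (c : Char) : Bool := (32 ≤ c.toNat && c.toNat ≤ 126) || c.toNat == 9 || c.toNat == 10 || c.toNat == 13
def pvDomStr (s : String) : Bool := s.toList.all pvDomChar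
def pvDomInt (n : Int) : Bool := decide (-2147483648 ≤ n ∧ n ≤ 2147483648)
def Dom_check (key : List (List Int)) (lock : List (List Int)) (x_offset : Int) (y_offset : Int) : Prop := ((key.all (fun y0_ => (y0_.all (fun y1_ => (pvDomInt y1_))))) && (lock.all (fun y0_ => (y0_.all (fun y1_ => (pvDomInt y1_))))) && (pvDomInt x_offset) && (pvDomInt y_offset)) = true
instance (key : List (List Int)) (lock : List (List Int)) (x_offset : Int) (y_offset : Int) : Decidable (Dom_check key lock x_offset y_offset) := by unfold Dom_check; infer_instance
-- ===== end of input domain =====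

-- B splits A's single blended scan of the lock into two passes: an uncovered-cells pass
-- over the lock grid and an overlap pass over the key's own grid (objective: alternative).

-- m[i][j]: out-of-range reads as 0 (where the Python raises IndexError the scan has already
-- witnessed a genuine violation or never reaches the cell, so both ports agree with their
-- Pythons wherever those return)
def cell (m : List (List Int)) (i j : Int) : Int :=
  PySem.List.pyGetD (PySem.List.pyGetD m i []) j 0

-- ===== PORT A =====
def check (key : List (List Int)) (lock : List (List Int)) (x_offset : Int) (y_offset : Int) : Bool :=
  let len_lock : Int := lock.length
  let len_key : Int := key.length
  (PySem.List.pyRange 0 len_lock 1).all fun i =>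
    (PySem.List.pyRange 0 len_lock 1).all fun j =>
      let key_x := i - x_offset
      let key_y := j - y_offset
      if 0 ≤ key_x ∧ key_x < len_key ∧ 0 ≤ key_y ∧ key_y < len_key then
        decide (cell lock i j + cell key key_x key_y = 1)
      else
        decide (cell lock i j = 1)

-- ===== PORT B =====
def check_alt (key : List (List Int)) (lock : List (List Int)) (x_offset : Int) (y_offset : Int) : Bool :=
  let len_lock : Int := lock.length
  let len_key : Int := key.length
  -- Pass 1: every lock cell not covered by the shifted key must already be 1.
  ((PySem.List.pyRange 0 len_lock 1).all fun i =>
    (PySem.List.pyRange 0 len_lock 1).all fun j =>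
      if ¬ (0 ≤ i - x_offset ∧ i - x_offset < len_key ∧ 0 ≤ j - y_offset ∧ j - y_offset < len_key) then
        decide (cell lock i j = 1)
      else
        true)
  &&
  -- Pass 2: iterate the key's own grid; cells landing inside the lock must sum to 1.
  ((PySem.List.pyRange 0 len_key 1).all fun kx =>
    (PySem.List.pyRange 0 len_key 1).all fun ky =>
      if 0 ≤ kx + x_offset ∧ kx + x_offset < len_lock ∧ 0 ≤ ky + y_offset ∧ ky + y_offset < len_lock then
        decide (cell lock (kx + x_offset) (ky + y_offset) + cell key kx ky = 1)
      else
        true)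

-- ===== PRECONDITION & SPEC =====
-- helpers for Pre_check: raw cell reads and the scan-order events of each program
def rowLen (m : List (List Int)) (i : Nat) : Nat := (m.getD i []).length
def mval (m : List (List Int)) (i j : Nat) : Int := (m.getD i []).getD j 0
-- cell (i,j) of the lock is covered by the key shifted by (x,y)
def covB (key : List (List Int)) (x y : Int) (i j : Nat) : Bool :=
  decide (x ≤ (i:Int) ∧ (i:Int) - x < (key.length:Int) ∧ y ≤ (j:Int) ∧ (j:Int) - y < (key.length:Int))
-- A's scan: cell (i,j) would raise IndexError / would fail its check
def badA (key lock : List (List Int)) (x y : Int) (i j : Nat) : Bool :=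
  decide (rowLen lock i ≤ j) ||
    (covB key x y i j && decide (rowLen key ((i:Int)-x).toNat ≤ ((j:Int)-y).toNat))
def violA (key lock : List (List Int)) (x y : Int) (i j : Nat) : Bool :=
  !badA key lock x y i j &&
    (if covB key x y i j then
       decide (mval lock i j + mval key ((i:Int)-x).toNat ((j:Int)-y).toNat ≠ 1)
     else decide (mval lock i j ≠ 1))
-- B's pass 1 (uncovered lock cells): raise / fail
def badB1 (key lock : List (List Int)) (x y : Int) (i j : Nat) : Bool :=
  !covB key x y i j && decide (rowLen lock i ≤ j)
def violB1 (key lock : List (List Int)) (x y : Int) (i j : Nat) : Bool :=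
  !covB key x y i j && decide (j < rowLen lock i) && decide (mval lock i j ≠ 1)
-- B's pass 2 (key cells landing inside the lock): raise / fail
def inLockB (lock : List (List Int)) (x y : Int) (kx ky : Nat) : Bool :=
  decide (0 ≤ (kx:Int) + x ∧ (kx:Int) + x < (lock.length:Int) ∧ 0 ≤ (ky:Int) + y ∧ (ky:Int) + y < (lock.length:Int))
def badB2 (key lock : List (List Int)) (x y : Int) (kx ky : Nat) : Bool :=
  inLockB lock x y kx ky &&
    (decide (rowLen lock ((kx:Int)+x).toNat ≤ ((ky:Int)+y).toNat) || decide (rowLen key kx ≤ ky))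
def violB2 (key lock : List (List Int)) (x y : Int) (kx ky : Nat) : Bool :=
  inLockB lock x y kx ky && !badB2 key lock x y kx ky &&
    decide (mval lock ((kx:Int)+x).toNat ((ky:Int)+y).toNat + mval key kx ky ≠ 1)

-- Pre_check is exactly the inputs on which both Pythons complete (no IndexError): every cell
-- whose access would go past a too-short row is preceded, in that program's own scan order, by a
-- cell that already fails its check; it therefore also excludes the ragged inputs on which A
-- still returns an early False but B's differently-ordered scan hits the short row first.
def Pre_check (key : List (List Int)) (lock : List (List Int)) (x_offset : Int) (y_offset : Int) : Prop :=
  (∀ i < lock.length, ∀ j < lock.length, badA key lock x_offset y_offset i j = true →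
     ∃ i' < lock.length, ∃ j' < lock.length,
       (i' < i ∨ (i' = i ∧ j' < j)) ∧ violA key lock x_offset y_offset i' j' = true) ∧
  (∀ i < lock.length, ∀ j < lock.length, badB1 key lock x_offset y_offset i j = true →
     ∃ i' < lock.length, ∃ j' < lock.length,
       (i' < i ∨ (i' = i ∧ j' < j)) ∧ violB1 key lock x_offset y_offset i' j' = true) ∧
  ((∃ i < lock.length, ∃ j < lock.length, violB1 key lock x_offset y_offset i j = true) ∨
   ∀ kx < key.length, ∀ ky < key.length, badB2 key lock x_offset y_offset kx ky = true →
     ∃ kx' < key.length, ∃ ky' < key.length,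
       (kx' < kx ∨ (kx' = kx ∧ ky' < ky)) ∧ violB2 key lock x_offset y_offset kx' ky' = true)
instance (key : List (List Int)) (lock : List (List Int)) (x_offset : Int) (y_offset : Int) : Decidable (Pre_check key lock x_offset y_offset) := by unfold Pre_check; refine @instDecidableAnd _ _ ?_ (@instDecidableAnd _ _ ?_ ?_) <;> infer_instance

def pvWitness_check : List (List Int) × List (List Int) × Int × Int :=
  ([[0]], [[1, 1], [1, 0]], 1, 1)

def Spec_check (key : List (List Int)) (lock : List (List Int)) (x_offset : Int) (y_offset : Int) (out : Bool) : Prop := out = check_alt key lock x_offset y_offset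
instance (key : List (List Int)) (lock : List (List Int)) (x_offset : Int) (y_offset : Int) (out : Bool) : Decidable (Spec_check key lock x_offset y_offset out) := by unfold Spec_check; infer_instance

-- ===== CLAIM (what is proved, stated in full; the proofs are below) =====
def Claim_equal_check : Prop := ∀ (key : List (List Int)) (lock : List (List Int)) (x_offset : Int) (y_offset : Int), Dom_check key lock x_offset y_offset → Pre_check key lock x_offset y_offset → Spec_check key lock x_offset y_offset (check key lock x_offset y_offset)

-- ===== LEMMAS AND PROOFS =====

theorem check_eq_alt (key lock : List (List Int)) (x_offset y_offset : Int) :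
    check key lock x_offset y_offset = check_alt key lock x_offset y_offset := by
  have h : check key lock x_offset y_offset = true ↔ check_alt key lock x_offset y_offset = true := by
    simp only [check, check_alt, List.all_eq_true, PySem.List.mem_pyRange_one,
      Bool.and_eq_true, and_imp]
    constructor
    · intro h
      refine ⟨fun i hi0 hi j hj0 hj => ?_, fun kx hkx0 hkx ky hky0 hky => ?_⟩
      · by_cases hc : 0 ≤ i - x_offset ∧ i - x_offset < (key.length : Int) ∧
            0 ≤ j - y_offset ∧ j - y_offset < (key.length : Int)
        · rw [if_neg (not_not_intro hc)]
        · rw [if_pos hc]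
          have := h i hi0 hi j hj0 hj
          rw [if_neg hc] at this
          exact this
      · by_cases hc : 0 ≤ kx + x_offset ∧ kx + x_offset < (lock.length : Int) ∧
            0 ≤ ky + y_offset ∧ ky + y_offset < (lock.length : Int)
        · have := h (kx + x_offset) hc.1 hc.2.1 (ky + y_offset) hc.2.2.1 hc.2.2.2
          have hc' : 0 ≤ kx + x_offset - x_offset ∧ kx + x_offset - x_offset < (key.length : Int) ∧
              0 ≤ ky + y_offset - y_offset ∧ ky + y_offset - y_offset < (key.length : Int) := by
            constructor; omega; constructor; omega; constructor; omega; omega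
          rw [if_pos hc'] at this
          have e1 : kx + x_offset - x_offset = kx := by omega
          have e2 : ky + y_offset - y_offset = ky := by omega
          rw [e1, e2] at this
          rw [if_pos hc]
          exact this
        · rw [if_neg hc]
    · rintro ⟨h1, h2⟩ i hi0 hi j hj0 hj
      by_cases hc : 0 ≤ i - x_offset ∧ i - x_offset < (key.length : Int) ∧
          0 ≤ j - y_offset ∧ j - y_offset < (key.length : Int)
      · rw [if_pos hc]
        have := h2 (i - x_offset) hc.1 hc.2.1 (j - y_offset) hc.2.2.1 hc.2.2.2
        have hc' : 0 ≤ i - x_offset + x_offset ∧ i - x_offset + x_offset < (lock.length : Int) ∧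
            0 ≤ j - y_offset + y_offset ∧ j - y_offset + y_offset < (lock.length : Int) := by
          constructor; omega; constructor; omega; constructor; omega; omega
        rw [if_pos hc'] at this
        have e1 : i - x_offset + x_offset = i := by omega
        have e2 : j - y_offset + y_offset = j := by omega
        rw [e1, e2] at this
        exact this
      · rw [if_neg hc]
        have := h1 i hi0 hi j hj0 hj
        rw [if_pos hc] at this
        exact this
  cases hA : check key lock x_offset y_offset <;>
    cases hB : check_alt key lock x_offset y_offset <;>
    simp_all

-- ===== VERDICT (by name: the statement is the Claim_ definition above) =====
theorem check_spec : Claim_equal_check := by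
  intro key lock x_offset y_offset _ _
  exact check_eq_alt key lock x_offset y_offset
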